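-- pv_equiv track=rewrite | github.com/jdraines/specmap | mcp/src/specmap_mcp/tools/get_unmapped.py | _lines_to_ranges
-- ===== SOURCE A (Python) =====
-- def _lines_to_ranges(lines: list[int]) -> list[dict]:
--     """Convert a sorted list of line numbers to ranges."""
--     if not lines:
--         return []
--
--     ranges = []
--     start = lines[0]
--     end = lines[0]
--
--     for line in lines[1:]:
--         if line == end + 1:
--             end = line
--         else:
--             ranges.append({"start": start, "end": end})
--             start = line
--             end = line
--
--     ranges.append({"start": start, "end": end})
--     return ranges
-- ===== SOURCE B (Python) =====
-- def _lines_to_ranges(lines: list[int]) -> list[dict]: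
--     """Convert a sorted list of line numbers to ranges."""
--     if not lines:
--         return []
--     gaps = [(a, b) for a, b in zip(lines, lines[1:]) if b != a + 1]
--     starts = [lines[0]] + [b for _, b in gaps]
--     ends = [a for a, _ in gaps] + [lines[-1]]
--     return [{"start": s, "end": e} for s, e in zip(starts, ends)]
-- ===== Notes on version B (the rewrite author's own statement) =====
-- stated objective: alternative
-- what changed: Replaces A's running start/end state machine with a staged, state-free computation: collect the adjacent pairs where consecutiveness breaks, derive the list of range starts and the list of range ends from those gap pairs, and zip them into the output.
import Mathlib
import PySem

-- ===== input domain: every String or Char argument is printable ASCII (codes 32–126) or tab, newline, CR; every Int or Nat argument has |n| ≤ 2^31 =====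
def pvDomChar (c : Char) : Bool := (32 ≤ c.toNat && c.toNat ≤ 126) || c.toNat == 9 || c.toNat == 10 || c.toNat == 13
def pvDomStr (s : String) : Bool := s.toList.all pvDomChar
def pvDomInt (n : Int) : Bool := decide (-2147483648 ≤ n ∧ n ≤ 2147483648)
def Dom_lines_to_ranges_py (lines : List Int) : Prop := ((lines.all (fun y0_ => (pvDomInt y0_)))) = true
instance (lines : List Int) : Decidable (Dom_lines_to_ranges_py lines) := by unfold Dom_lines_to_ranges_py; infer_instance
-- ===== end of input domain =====

-- B replaces A's running start/end state machine by a staged, state-free computation: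
-- the gap pairs (adjacent elements that are not consecutive) are collected first, the
-- start list and end list are derived from them, and the two are zipped (objective: alternative).

-- ===== PORT A =====
-- the body of A's for-loop over lines[1:], state = (ranges, start, end)
def stepA (st : List (List (String × Int)) × Int × Int) (line : Int) :
    List (List (String × Int)) × Int × Int :=
  if line = st.2.2 + 1 then (st.1, st.2.1, line)
  else (st.1 ++ [[("start", st.2.1), ("end", st.2.2)]], line, line)

def lines_to_ranges_py (lines : List Int) : List (List (String × Int)) :=
  match lines with
  | [] => []
  | x :: _ =>
    let st := (PySem.List.slice lines (some 1) none).foldl stepA ([], x, x)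
    st.1 ++ [[("start", st.2.1), ("end", st.2.2)]]

-- ===== PORT B =====
def lines_to_ranges_py_alt (lines : List Int) : List (List (String × Int)) :=
  match lines with
  | [] => []
  | x :: _ =>
    let gaps := (lines.zip (PySem.List.slice lines (some 1) none)).filter
      (fun p => p.2 ≠ p.1 + 1)
    let starts := [x] ++ gaps.map Prod.snd
    -- lines[-1]: in range since lines is nonempty here
    let ends := gaps.map Prod.fst ++ [(PySem.List.pyGet? lines (-1)).getD 0]
    (starts.zip ends).map (fun p => [("start", p.1), ("end", p.2)])

-- ===== PRECONDITION & SPEC =====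
def Spec_lines_to_ranges_py (lines : List Int) (out : List (List (String × Int))) : Prop := out = lines_to_ranges_py_alt lines
instance (lines : List Int) (out : List (List (String × Int))) : Decidable (Spec_lines_to_ranges_py lines out) := by unfold Spec_lines_to_ranges_py; infer_instance

-- ===== CLAIM =====
def Claim_equal_lines_to_ranges_py : Prop := ∀ (lines : List Int), Dom_lines_to_ranges_py lines → Spec_lines_to_ranges_py lines (lines_to_ranges_py lines)

-- ===== LEMMAS AND PROOFS =====

def mkRange (s e : Int) : List (String × Int) := [("start", s), ("end", e)]

-- the run decomposition A computes: state (s, e), one pair per maximal run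
def go (s e : Int) : List Int → List (Int × Int)
  | [] => [(s, e)]
  | y :: ys => if y = e + 1 then go s y ys else (s, e) :: go y y ys

theorem A_fold (xs : List Int) : ∀ (acc : List (List (String × Int))) (s e : Int),
    (let st := xs.foldl stepA (acc, s, e); st.1 ++ [mkRange st.2.1 st.2.2])
      = acc ++ (go s e xs).map (fun p => mkRange p.1 p.2) := by
  induction xs with
  | nil => intro acc s e; simp [go]
  | cons y ys ih =>
    intro acc s e
    simp only [List.foldl_cons, stepA, go]
    by_cases h : y = e + 1
    · simpa [h] using ih acc s y
    · simpa [h] using ih (acc ++ [mkRange s e]) y y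

-- the gap pairs of a list: adjacent pairs that are not consecutive
def G (zs : List Int) : List (Int × Int) :=
  (zs.zip zs.tail).filter (fun p => p.2 ≠ p.1 + 1)

-- B's zip of starts and ends equals A's run decomposition
theorem go_zip (ys : List Int) : ∀ (s e : Int),
    ((([s] ++ (G (e :: ys)).map Prod.snd).zip
        ((G (e :: ys)).map Prod.fst ++ [(e :: ys).getLastD 0])).map
      (fun p => mkRange p.1 p.2))
      = (go s e ys).map (fun p => mkRange p.1 p.2) := by
  induction ys with
  | nil => intro s e; simp [G, go]
  | cons y ys ih =>
    intro s e
    simp only [go]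
    by_cases h : y = e + 1
    · have hg : G (e :: y :: ys) = G (y :: ys) := by simp [G, h]
      have hl : (e :: y :: ys).getLastD 0 = (y :: ys).getLastD 0 := by simp
      rw [hg, hl] at *
      simpa [h] using ih s y
    · have hg : G (e :: y :: ys) = (e, y) :: G (y :: ys) := by
        simp [G, h]
      rw [hg]
      simp only [List.map_cons, List.cons_append, List.zip_cons_cons, List.map_cons]
      rw [if_neg h]
      simp only [List.map_cons]
      congr 1
      simpa using ih y y

-- ===== VERDICT =====
theorem lines_to_ranges_py_spec : Claim_equal_lines_to_ranges_py := by
  intro lines _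
  unfold Spec_lines_to_ranges_py
  cases lines with
  | nil => rfl
  | cons x xs =>
    have hA : lines_to_ranges_py (x :: xs)
        = (go x x xs).map (fun p => mkRange p.1 p.2) := by
      unfold lines_to_ranges_py
      rw [PySem.List.slice_from_one]
      simpa [mkRange] using A_fold xs [] x x
    have hB : lines_to_ranges_py_alt (x :: xs)
        = (go x x xs).map (fun p => mkRange p.1 p.2) := by
      unfold lines_to_ranges_py_alt
      rw [PySem.List.slice_from_one]
      have hlast : (PySem.List.pyGet? (x :: xs) (-1)).getD 0 = (x :: xs).getLastD 0 := by
        rw [PySem.List.pyGet?_neg_one]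
        simp [List.getLastD, List.getLast?_eq_some_getLast]
      simp only [List.tail_cons, hlast]
      simpa [G, mkRange] using go_zip xs x x
    rw [hA, hB]
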